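-- pv_equiv track=rewrite | github.com/sleirsgoevy/fuckingrender | configedit.py | encode_time
-- ===== SOURCE A (Python) =====
-- def encode_time(x):
--     x *= 2
--     ans = []
--     for i in range(3):
--         ans.append(x % 60)
--         x //= 60
--     ans.append(x)
--     ans.reverse()
--     ans[-1] //= 2
--     return '%02d:%02d:%02d:%02d'%tuple(ans)
-- ===== SOURCE B (Python) =====
-- def encode_time(x):
--     y = 2 * x
--     return '%02d:%02d:%02d:%02d' % (y // 216000, y // 3600 % 60, y // 60 % 60, y % 60 // 2)
-- ===== Notes on version B (the rewrite author's own statement) =====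
-- stated objective: simpler
-- what changed: Replaces the remainder-peeling loop with list append/reverse and in-place halving by a single closed-form expression computing each of the four fields independently from the doubled input.
import Mathlib
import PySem

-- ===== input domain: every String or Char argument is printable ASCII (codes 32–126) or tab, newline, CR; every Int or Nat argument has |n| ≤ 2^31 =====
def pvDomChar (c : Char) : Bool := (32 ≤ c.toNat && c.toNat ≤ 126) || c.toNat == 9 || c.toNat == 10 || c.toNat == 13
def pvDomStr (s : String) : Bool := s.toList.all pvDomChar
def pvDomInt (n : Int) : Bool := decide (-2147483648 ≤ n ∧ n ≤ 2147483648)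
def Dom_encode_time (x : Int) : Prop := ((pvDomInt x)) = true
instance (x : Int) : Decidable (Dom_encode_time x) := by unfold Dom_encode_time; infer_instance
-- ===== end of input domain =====

-- B replaces A's remainder-peeling loop (append / reverse / in-place halving) by four
-- independent closed-form field expressions; objective: simpler.


-- shared formatting helpers: Python's '%02d' and '%02d:%02d:%02d:%02d' % tuple(ans)
-- (exact for ints: '%02d' left-pads with '0' to width 2, sign included in the width)
def fmt02 (n : Int) : String :=
  let s := PySem.Int.toStr n
  if s.toList.length < 2 then "0" ++ s else s

def fmtTime (ans : List Int) : String :=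
  String.intercalate ":" (ans.map fmt02)

-- ===== PORT A =====
def encode_time (x : Int) : String :=
  let x := x * 2
  let st := (List.range 3).foldl
      (fun (st : Int × List Int) _ =>
        (PySem.Int.floordiv st.1 60, st.2 ++ [PySem.Int.mod st.1 60]))
      (x, [])
  let ans := st.2 ++ [st.1]
  let ans := ans.reverse
  let ans := ans.modify (ans.length - 1) (fun v => PySem.Int.floordiv v 2)
  fmtTime ans

-- ===== PORT B =====
def encode_time_alt (x : Int) : String :=
  let y := 2 * x
  fmtTime [PySem.Int.floordiv y 216000,
           PySem.Int.mod (PySem.Int.floordiv y 3600) 60,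
           PySem.Int.mod (PySem.Int.floordiv y 60) 60,
           PySem.Int.floordiv (PySem.Int.mod y 60) 2]

-- ===== PRECONDITION & SPEC =====
def Spec_encode_time (x : Int) (out : String) : Prop := out = encode_time_alt x
instance (x : Int) (out : String) : Decidable (Spec_encode_time x out) := by unfold Spec_encode_time; infer_instance

-- ===== CLAIM (what is proved, stated in full; the proofs are below) =====
def Claim_equal_encode_time : Prop := ∀ (x : Int), Dom_encode_time x → Spec_encode_time x (encode_time x)

-- ===== LEMMAS AND PROOFS =====

theorem ediv_ediv_ediv (y : Int) : y / 60 / 60 / 60 = y / 216000 := by omega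

theorem ediv_ediv_mod (y : Int) : y / 60 / 60 % 60 = y / 3600 % 60 := by omega

-- ===== VERDICT (by name: the statement is the Claim_ definition above) =====
theorem encode_time_spec : Claim_equal_encode_time := by
  intro x _
  unfold Spec_encode_time encode_time encode_time_alt
  simp only [List.range_succ, List.range_zero, List.nil_append, List.foldl_cons,
    List.foldl_nil, List.cons_append, List.reverse_cons, List.reverse_nil,
    List.length, List.modify, fmtTime]
  simp [ediv_ediv_ediv, ediv_ediv_mod, mul_comm]
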